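-- pv_equiv track=rewrite | github.com/alexandraback/datacollection | solutions_5688567749672960_0/Python/gaulois/counter_culture.py | optimizeDigit
-- ===== SOURCE A (Python) =====
-- def optimizeDigit(sNum, iDigit, N):
--     sNum = list(sNum)
--
--     n = int(sNum[iDigit])
--     best = -1
--     for i in range(n, 10):
--         pre = sNum[iDigit]
--         sNum[iDigit] = str(i)
--
--         sNum.reverse()
--         nTry = int( "".join(sNum) )
--         if nTry <= N:
--             best = i
--         sNum.reverse()
--
--         sNum[iDigit] = pre
--
--     return best
-- ===== SOURCE B (Python) =====
-- def optimizeDigit(sNum, iDigit, N):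
--     # closed form: the tried number is base + i*place (i the digit put at iDigit), so the
--     # best digit is min((N - base)//place, 9) if that is >= the current digit, else -1
--     L = len(sNum)
--     j = iDigit if iDigit >= 0 else iDigit + L
--     base = 0
--     for k, ch in enumerate(sNum):
--         if k != j:
--             base += int(ch) * 10 ** k
--     best = min((N - base) // 10 ** j, 9)
--     return best if best >= int(sNum[iDigit]) else -1
-- ===== Notes on version B (the rewrite author's own statement) =====
-- stated objective: alternative
-- what changed: Instead of trying every candidate digit and re-joining/re-parsing the reversed string ten times, B computes the reversed number's value with the chosen position excluded in one enumerate pass and solves base + i*place <= N for the digit i in closed form with one floor division.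
-- outside the precondition, e.g. on optimizeDigit(' 5', 1, 50): A returns 9, B raises ValueError
import Mathlib
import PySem

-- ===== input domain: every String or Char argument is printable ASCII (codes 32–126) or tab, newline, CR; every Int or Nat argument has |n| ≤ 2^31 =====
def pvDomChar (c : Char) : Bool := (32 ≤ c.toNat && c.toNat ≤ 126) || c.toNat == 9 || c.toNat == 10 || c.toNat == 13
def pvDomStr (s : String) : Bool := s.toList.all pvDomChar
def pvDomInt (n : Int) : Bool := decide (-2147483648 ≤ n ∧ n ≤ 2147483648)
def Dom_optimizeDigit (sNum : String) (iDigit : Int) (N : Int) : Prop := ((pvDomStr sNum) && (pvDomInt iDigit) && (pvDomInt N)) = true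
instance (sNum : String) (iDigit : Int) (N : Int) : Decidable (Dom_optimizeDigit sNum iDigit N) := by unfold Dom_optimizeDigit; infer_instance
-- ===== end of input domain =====

-- ===== PORT A =====
-- B replaces A's ten join/int() reparses of the reversed digit string by one arithmetic pass
-- and a closed-form floor division (objective: alternative); return-value equivalence only
-- (A mutates and restores its local list copy, nothing observable escapes).
def optimizeDigit (sNum : String) (iDigit : Int) (N : Int) : Int :=
  let l := sNum.toList
  -- n = int(sNum[iDigit]); indexing via pyGetD, int() via ofStr?; the .getD 0 totalisations
  -- are exact under Pre_ (index in range, digit-only string, so neither is none)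
  let n := (PySem.Int.ofStr? (String.ofList [PySem.List.pyGetD l iDigit ' '])).getD 0
  (PySem.List.pyRange n 10 1).foldl (fun best i =>
    -- sNum[iDigit] = str(i): under Pre_ the loop range is 0 ≤ n ≤ i ≤ 9, so str(i) is a
    -- single char, taken as the head of toChars i
    let l' := PySem.List.pySetD l iDigit ((PySem.Int.toChars i).headD ' ')
    -- sNum.reverse(); nTry = int("".join(sNum)); the closing reverse() and sNum[iDigit] = pre
    -- only undo the mutation, which rebuilding l' from l each iteration makes implicit
    let nTry := (PySem.Int.ofStr? (String.ofList l'.reverse)).getD 0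
    if nTry ≤ N then i else best) (-1)

-- ===== PORT B =====
def optimizeDigit_alt (sNum : String) (iDigit : Int) (N : Int) : Int :=
  let l := sNum.toList
  let L : Int := l.length
  let j := if 0 ≤ iDigit then iDigit else iDigit + L
  -- int(ch) via ofStr?; the .getD 0 totalisations are exact under Pre_ (digit-only string)
  let base := (PySem.List.enumerate l 0).foldl
    (fun b kc => if kc.1 ≠ j then
      b + (PySem.Int.ofStr? (String.ofList [kc.2])).getD 0 * 10 ^ kc.1.toNat else b) 0
  let best := min (PySem.Int.floordiv (N - base) (10 ^ j.toNat)) 9   -- 10 ** j; 0 ≤ j under Pre_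
  if (PySem.Int.ofStr? (String.ofList [PySem.List.pyGetD l iDigit ' '])).getD 0 ≤ best
    then best else -1

-- ===== PRECONDITION & SPEC =====
-- Pre_ excludes the inputs on which A raises (empty string / index out of range: IndexError;
-- a non-digit at iDigit or a joined string int() cannot parse: ValueError) and, with the same
-- digits-only condition, the rare strings with non-digit characters on which int()'s
-- whitespace/sign leniency still lets A return: there A's value is an artefact of the
-- reverse/join reparse and B's ord() arithmetic is the natural reading.
def Pre_optimizeDigit (sNum : String) (iDigit : Int) (N : Int) : Prop :=
  sNum.toList ≠ [] ∧ PySem.Raise.InRange sNum.toList.length iDigit ∧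
    sNum.toList.all (fun c => c.isDigit) = true
instance (sNum : String) (iDigit : Int) (N : Int) : Decidable (Pre_optimizeDigit sNum iDigit N) := by
  unfold Pre_optimizeDigit; infer_instance
def pvWitness_optimizeDigit : String × Int × Int := ("15", 0, 20)
def Spec_optimizeDigit (sNum : String) (iDigit : Int) (N : Int) (out : Int) : Prop :=
  out = optimizeDigit_alt sNum iDigit N
instance (sNum : String) (iDigit : Int) (N : Int) (out : Int) : Decidable (Spec_optimizeDigit sNum iDigit N out) := by
  unfold Spec_optimizeDigit; infer_instance

-- ===== CLAIM (what is proved, stated in full; the proofs are below) =====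
def Claim_equal_optimizeDigit : Prop := ∀ (sNum : String) (iDigit : Int) (N : Int), Dom_optimizeDigit sNum iDigit N → Pre_optimizeDigit sNum iDigit N → Spec_optimizeDigit sNum iDigit N (optimizeDigit sNum iDigit N)

-- ===== LEMMAS AND PROOFS =====


def pvDval (c : Char) : Int := (c.toNat : Int) - 48

def pvRval : List Char → Int
  | [] => 0
  | c :: t => pvDval c + 10 * pvRval t

def pvAcc : Nat → List Char → Nat
  | a, [] => a
  | a, c :: t => pvAcc (a * 10 + (c.toNat - 48)) t


theorem pvDigit_toNat {c : Char} (h : c.isDigit = true) : 48 ≤ c.toNat ∧ c.toNat ≤ 57 := by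
  simp only [Char.isDigit, Bool.and_eq_true, decide_eq_true_eq] at h
  exact h

theorem pvDigit_cases {c : Char} (h : c.isDigit = true) :
    c = '0' ∨ c = '1' ∨ c = '2' ∨ c = '3' ∨ c = '4' ∨ c = '5' ∨ c = '6' ∨ c = '7' ∨ c = '8' ∨ c = '9' := by
  obtain ⟨h1, h2⟩ := pvDigit_toNat h
  have hofn := Char.ofNat_toNat c
  interval_cases hn : c.toNat <;> rw [← hofn] <;> decide

theorem pvDigit_not_space {c : Char} (h : c.isDigit = true) : PySem.Int.isIntSpace c = false := by
  have hb := pvDigit_toNat h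
  have hne : ∀ d : Char, d.toNat < 48 → c ≠ d := by
    intro d hd he; subst he; omega
  simp [PySem.Int.isIntSpace, hne ' ' (by decide), hne '\t' (by decide), hne '\n' (by decide),
    hne '\x0d' (by decide), hne '\x0b' (by decide), hne '\x0c' (by decide)]

theorem pvDropWhile_digits (l : List Char) (h : ∀ c ∈ l, c.isDigit = true) :
    l.dropWhile PySem.Int.isIntSpace = l := by
  cases l with
  | nil => rfl
  | cons c t => rw [List.dropWhile_cons, pvDigit_not_space (h c (by simp))]; rfl

-- any function satisfying the digit-branch equations of the (private) digit loop inside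
-- PySem.Int.ofChars? computes pvAcc on all-digit input; instantiated with that private loop,
-- whose equations hold by rfl once the head char is a literal
theorem pvGoU (f : List Char → Bool → Nat → Option Nat)
    (hnil : ∀ acc, f [] true acc = some acc)
    (hstep : ∀ c rest acc, c.isDigit = true →
      f (c :: rest) true acc = f rest true (acc * 10 + (c.toNat - '0'.toNat))) :
    ∀ t acc, (∀ x ∈ t, x.isDigit = true) → f t true acc = some (pvAcc acc t) := by
  intro t
  induction t with
  | nil => intro acc _; rw [hnil]; rfl
  | cons c r ih =>
    intro acc h
    rw [hstep c r acc (h c (by simp)), ih _ (fun x hx => h x (by simp [hx]))]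
    rfl

theorem pvParseBranch (g : List Char → Option Nat) (f : List Char → Bool → Nat → Option Nat)
    (hg : ∀ c t, c.isDigit = true →
      g (c :: t) = f t true (0 * 10 + (c.toNat - '0'.toNat)))
    (hnil : ∀ acc, f [] true acc = some acc)
    (hstep : ∀ c rest acc, c.isDigit = true →
      f (c :: rest) true acc = f rest true (acc * 10 + (c.toNat - '0'.toNat)))
    (c : Char) (t : List Char) (hd : ∀ x ∈ c :: t, x.isDigit = true) :
    Option.map (fun n => n) (do let a ← g (c :: t); pure ((a : Int)))
      = some ((pvAcc 0 (c :: t) : Nat) : Int) := by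
  rw [hg c t (hd c (by simp)), pvGoU f hnil hstep t _ (fun x hx => hd x (by simp [hx]))]
  rfl

theorem pvOfChars_digits (cs : List Char) (hne : cs ≠ []) (hd : ∀ c ∈ cs, c.isDigit = true) :
    PySem.Int.ofChars? cs = some ((pvAcc 0 cs : Nat) : Int) := by
  obtain ⟨c, t, rfl⟩ : ∃ c t, cs = c :: t := by
    cases cs with
    | nil => exact absurd rfl hne
    | cons c t => exact ⟨c, t, rfl⟩
  have hrev : ∀ x ∈ (c :: t).reverse, x.isDigit = true := by
    intro x hx; exact hd x (List.mem_reverse.mp hx)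
  simp only [PySem.Int.ofChars?]
  rw [pvDropWhile_digits _ hd, pvDropWhile_digits _ hrev, List.reverse_reverse]
  split
  · next ds heq =>
    exfalso
    have hdc := hd c (by simp)
    rw [show c = '-' from (List.cons.injEq _ _ _ _ ▸ heq).1] at hdc
    exact absurd hdc (by decide)
  · next ds heq =>
    exfalso
    have hdc := hd c (by simp)
    rw [show c = '+' from (List.cons.injEq _ _ _ _ ▸ heq).1] at hdc
    exact absurd hdc (by decide)
  · refine pvParseBranch ?g ?f ?hg ?hnil ?hstep c t hd
    case hg =>
      intro c' t' hc'
      rcases pvDigit_cases hc' with rfl|rfl|rfl|rfl|rfl|rfl|rfl|rfl|rfl|rfl <;> rfl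
    case hnil => intro acc; rfl
    case hstep =>
      intro c' rest acc hc'
      rcases pvDigit_cases hc' with rfl|rfl|rfl|rfl|rfl|rfl|rfl|rfl|rfl|rfl <;> rfl

theorem pvAcc_append (xs : List Char) : ∀ (a : Nat) (c : Char),
    pvAcc a (xs ++ [c]) = pvAcc a xs * 10 + (c.toNat - 48) := by
  induction xs with
  | nil => intro a c; rfl
  | cons x t ih => intro a c; rw [List.cons_append]; exact ih (a * 10 + (x.toNat - 48)) c

theorem pvAcc_reverse (l : List Char) : ∀ (a : Nat), (∀ c ∈ l, c.isDigit = true) →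
    ((pvAcc a l.reverse : Nat) : Int) = (a : Int) * 10 ^ l.length + pvRval l := by
  induction l with
  | nil => intro a _; rw [List.reverse_nil, show pvAcc a [] = a from rfl]; simp [pvRval]
  | cons c t ih =>
    intro a hd
    have h48 : 48 ≤ c.toNat := (pvDigit_toNat (hd c (by simp))).1
    rw [List.reverse_cons, pvAcc_append]
    push_cast [h48]
    rw [ih a (fun x hx => hd x (by simp [hx]))]
    simp only [pvRval, pvDval, List.length_cons, pow_succ]
    ring

theorem pvRval_set (l : List Char) : ∀ (k : Nat) (c : Char), k < l.length →
    pvRval (l.set k c) = pvRval (l.set k '0') + pvDval c * 10 ^ k := by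
  induction l with
  | nil => intro k c h; simp at h
  | cons x t ih =>
    intro k c h
    cases k with
    | zero =>
      simp only [List.set_cons_zero, pvRval, pvDval, pow_zero]
      have : ('0').toNat = 48 := by decide
      rw [this]; ring
    | succ k =>
      simp only [List.set_cons_succ, pvRval, pvDval, pow_succ]
      rw [ih k c (by simpa using h)]
      simp only [pvDval]
      ring

def pvBase (j : Int) : List Char → Nat → Int
  | [], _ => 0
  | c :: t, s => (if (s : Int) ≠ j then ((c.toNat : Int) - 48) * 10 ^ s else 0) + pvBase j t (s + 1)

theorem pvEnumFold (j : Int) : ∀ (l : List Char) (s : Nat) (b : Int),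
    (∀ c ∈ l, c.isDigit = true) →
    (PySem.List.enumerate l (s : Int)).foldl
      (fun b kc => if kc.1 ≠ j then
        b + (PySem.Int.ofStr? (String.ofList [kc.2])).getD 0 * 10 ^ kc.1.toNat else b) b
      = b + pvBase j l s := by
  intro l
  induction l with
  | nil => intro s b _; simp [PySem.List.enumerate, pvBase]
  | cons c t ih =>
    intro s b hd
    have hc : c.isDigit = true := hd c (by simp)
    have h48 := pvDigit_toNat hc
    have hparse : (PySem.Int.ofStr? (String.ofList [c])).getD 0 = (c.toNat : Int) - 48 := by
      rw [PySem.Int.ofStr?_ofList,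
        pvOfChars_digits [c] (by simp) (by intro x hx; simp at hx; subst hx; exact hc)]
      rw [show pvAcc 0 [c] = 0 * 10 + (c.toNat - 48) from rfl, Option.getD_some]
      omega
    rw [show PySem.List.enumerate (c :: t) (s : Int) = ((s : Int), c) :: PySem.List.enumerate t ((s : Int) + 1) from rfl]
    rw [List.foldl_cons]
    rw [show ((s : Int) + 1) = ((s + 1 : Nat) : Int) by push_cast; ring]
    rw [ih (s + 1) _ (fun x hx => hd x (by simp [hx]))]
    simp only [pvBase, Int.toNat_natCast, hparse]
    by_cases hs : (s : Int) ≠ j <;> simp [hs] <;> ring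

theorem pvBase_lt (l : List Char) : ∀ (s : Nat) (j : Int), j < (s : Int) →
    pvBase j l s = 10 ^ s * pvRval l := by
  induction l with
  | nil => intro s j h; simp [pvBase, pvRval]
  | cons c t ih =>
    intro s j h
    simp only [pvBase, pvRval]
    rw [ih (s + 1) j (by push_cast; omega)]
    have hsne : (s : Int) ≠ j := by omega
    rw [if_pos hsne]
    simp only [pvDval, pow_succ]
    ring

theorem pvBase_rval (l : List Char) : ∀ (jn s : Nat), jn < l.length →
    pvBase ((jn : Int) + (s : Int)) l s = 10 ^ s * pvRval (l.set jn '0') := by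
  induction l with
  | nil => intro jn s h; simp at h
  | cons c t ih =>
    intro jn s h
    cases jn with
    | zero =>
      simp only [List.set_cons_zero, pvRval, pvBase]
      rw [if_neg (by push_cast; omega)]
      rw [pvBase_lt t (s + 1) ((0 : Nat) + (s : Int)) (by push_cast; omega)]
      rw [show pvDval '0' = 0 from by decide]
      rw [pow_succ]
      ring
    | succ k =>
      simp only [List.set_cons_succ, pvRval, pvBase]
      rw [if_pos (by push_cast; omega)]
      rw [show (((k + 1 : Nat) : Int) + (s : Int)) = ((k : Int) + ((s + 1 : Nat) : Int)) by push_cast; ring]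
      rw [ih k (s + 1) (by simpa using h)]
      simp only [pvDval, pow_succ]
      ring

theorem pvLoop (d : Int) : ∀ (k : Nat) (a init : Int),
    (PySem.List.pyRange a (a + (k : Int)) 1).foldl (fun best i => if i ≤ d then i else best) init
      = if k = 0 then init else if d < a then init else min d (a + (k : Int) - 1) := by
  intro k
  induction k with
  | zero => intro a init; simp [PySem.List.pyRange]
  | succ k ih =>
    intro a init
    rw [show (a + ((k + 1 : Nat) : Int)) = (a + (k : Int)) + 1 by push_cast; ring]
    rw [PySem.List.pyRange_one_succ_right (by omega)]
    rw [List.foldl_append, ih a init]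
    simp only [List.foldl_cons, List.foldl_nil]
    rw [if_neg (show ¬ (k + 1 = 0) from by omega)]
    rcases Nat.eq_zero_or_pos k with hk | hk
    · subst hk
      simp only [Nat.cast_zero, add_zero, min_def]
      split_ifs <;> omega
    · rw [if_neg (show ¬ (k = 0) from by omega)]
      simp only [min_def]
      split_ifs <;> omega

theorem pvIdx_inrange (L : Nat) (i : Int) (h : PySem.Raise.InRange L i) :
    PySem.List.pyIdx? L i = some (if 0 ≤ i then i.toNat else L - (-i).toNat) := by
  obtain ⟨h1, h2⟩ := h
  simp only [PySem.List.pyIdx?]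
  split_ifs with ha
  · rfl
  · rfl

theorem pvToChars_digit (i : Int) (h0 : 0 ≤ i) (h9 : i ≤ 9) :
    ((PySem.Int.toChars i).headD ' ').isDigit = true
      ∧ (((PySem.Int.toChars i).headD ' ').toNat : Int) - 48 = i := by
  interval_cases i <;> exact ⟨by decide, by decide⟩

-- ===== VERDICT (by name: the statement is the Claim_ definition above) =====
theorem optimizeDigit_spec : Claim_equal_optimizeDigit := by
  intro sNum iDigit N _ hpre
  obtain ⟨hne, hrange, hdigAll⟩ := hpre
  have hdig : ∀ c ∈ sNum.toList, c.isDigit = true := by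
    simpa using List.all_eq_true.mp hdigAll
  unfold Spec_optimizeDigit
  set l := sNum.toList with hl
  have hL0 : 0 < l.length := List.length_pos_iff.mpr hne
  have hidx := pvIdx_inrange l.length iDigit hrange
  set jn : Nat := if 0 ≤ iDigit then iDigit.toNat else l.length - (-iDigit).toNat with hjndef
  have hjn : jn < l.length := by
    obtain ⟨h1, h2⟩ := hrange
    rw [hjndef]; split_ifs <;> omega
  have hget : PySem.List.pyGetD l iDigit ' ' = l[jn] := by
    simp only [PySem.List.pyGetD, PySem.List.pyGet?, hidx, Option.bind_some,
      List.getElem?_eq_getElem hjn, Option.getD_some]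
  have hset : ∀ v, PySem.List.pySetD l iDigit v = l.set jn v := by
    intro v
    simp only [PySem.List.pySetD, PySem.List.pySet?, hidx, Option.map_some, Option.getD_some]
  have hc0 : l[jn].isDigit = true := hdig _ (List.getElem_mem hjn)
  have h48 := pvDigit_toNat hc0
  -- abbreviations for the common quantities
  set Z : Int := pvRval (l.set jn '0') with hZ
  set P : Int := (10 : Int) ^ jn with hP
  have hPpos : 0 < P := by positivity
  set nI : Int := (l[jn].toNat : Int) - 48 with hnI
  set d : Int := PySem.Int.floordiv (N - Z) P with hd
  -- n = int(sNum[iDigit])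
  have hparse1 : (PySem.Int.ofStr? (String.ofList [l[jn]])).getD 0 = nI := by
    rw [PySem.Int.ofStr?_ofList,
      pvOfChars_digits [l[jn]] (by simp) (by intro x hx; simp at hx; subst hx; exact hc0)]
    have : pvAcc 0 [l[jn]] = l[jn].toNat - 48 := by
      rw [show pvAcc 0 [l[jn]] = 0 * 10 + (l[jn].toNat - 48) from rfl]; omega
    rw [this, Option.getD_some]; omega
  have hn9 : 0 ≤ nI ∧ nI ≤ 9 := by omega
  -- A's loop in closed form
  have hA : optimizeDigit sNum iDigit N = if d < nI then -1 else min d 9 := by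
    simp only [optimizeDigit, ← hl, hget, hparse1]
    rw [PySem.List.foldl_congr_mem _ _ (fun best i => if i ≤ d then i else best) _ ?_]
    · rw [show (10 : Int) = nI + (((10 - nI).toNat : Nat) : Int) by omega]
      rw [pvLoop d ((10 - nI).toNat) nI (-1)]
      rw [if_neg (show ¬ ((10 - nI).toNat = 0) from by omega)]
      rw [show nI + (((10 - nI).toNat : Nat) : Int) - 1 = 9 from by omega]
    · intro best i hi
      rw [PySem.List.mem_pyRange_one] at hi
      obtain ⟨hdc, hdcv⟩ := pvToChars_digit i (by omega) (by omega)
      set dc : Char := (PySem.Int.toChars i).headD ' ' with hdcdef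
      have hdigs : ∀ x ∈ l.set jn dc, x.isDigit = true := by
        intro x hx
        rcases List.mem_or_eq_of_mem_set hx with hx' | rfl
        · exact hdig x hx'
        · exact hdc
      have hparse2 : (PySem.Int.ofStr? (String.ofList (l.set jn dc).reverse)).getD 0
          = Z + i * P := by
        rw [PySem.Int.ofStr?_ofList,
          pvOfChars_digits (l.set jn dc).reverse
            (by simp; omega)
            (by intro x hx; exact hdigs x (List.mem_reverse.mp hx))]
        rw [Option.getD_some, pvAcc_reverse (l.set jn dc) 0 hdigs]
        rw [pvRval_set l jn dc hjn]
        simp only [pvDval, hdcv, Nat.cast_zero, zero_mul, zero_add, hZ, hP]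
      rw [hset dc, hparse2]
      have hcond : (Z + i * P ≤ N) ↔ (i ≤ d) := by
        rw [hd, PySem.Int.le_floordiv_iff_mul_le hPpos]
        constructor <;> intro h <;> linarith
      simp only [hcond]
  -- B in closed form
  have hjB : (if 0 ≤ iDigit then iDigit else iDigit + ((l.length : Nat) : Int))
      = ((jn : Int) + ((0 : Nat) : Int)) := by
    obtain ⟨h1, h2⟩ := hrange
    rw [hjndef]; split_ifs <;> push_cast <;> omega
  have hB : optimizeDigit_alt sNum iDigit N = if nI ≤ min d 9 then min d 9 else -1 := by
    simp only [optimizeDigit_alt, ← hl, hget, hjB, hparse1]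
    rw [show (PySem.List.enumerate l (0 : Int)).foldl
        (fun b kc => if kc.1 ≠ ((jn : Int) + ((0 : Nat) : Int)) then
          b + (PySem.Int.ofStr? (String.ofList [kc.2])).getD 0 * 10 ^ kc.1.toNat else b) (0 : Int)
        = (0 : Int) + pvBase ((jn : Int) + ((0 : Nat) : Int)) l 0 from by
      simpa using pvEnumFold ((jn : Int) + ((0 : Nat) : Int)) l 0 0 hdig]
    rw [pvBase_rval l jn 0 hjn]
    rw [show ((jn : Int) + ((0 : Nat) : Int)).toNat = jn from by omega]
    simp only [pow_zero, one_mul, zero_add, ← hZ, ← hP, ← hd]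
  rw [hA, hB]
  simp only [min_def]
  split_ifs <;> omega
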